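-- pv_equiv track=rewrite | github.com/philippgadow/jobOptions_darkHiggsbb | batch_submission/ClusterSubmission/python/UpdateSampleLists.py | GetAMITagsMC
-- ===== SOURCE A (Python) =====
-- def GetAMITagsMC(DS, SkimPTag=False, SkimETag=True, SkimSTag=True):
--     Tag = DS[DS.rfind(".") + 1:]
--     if SkimPTag:
--         while SkimETag and Tag.find("e") != -1:
--             Tag = Tag[Tag.find("_") + 1:]
--         while SkimSTag and Tag.find("s") != -1:
--             Tag = Tag[Tag.find("_") + 1:]
--         while SkimSTag and Tag.find("a") != -1:
--             Tag = Tag[Tag.find("_") + 1:]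
--         while Tag.rfind("_p") != -1:
--             Tag = Tag[:Tag.rfind("_p")]
--         return Tag
--     else:
--         if Tag.rfind("_p") != -1:
--             Tag = Tag[Tag.find("_p"):]
--             while Tag.rfind("_p") != Tag.rfind("_"):
--                 Tag = Tag[:Tag.rfind("_")]
--             if Tag.startswith("_"): Tag = Tag[1:]
--             return GetAMITagsMC(DS, SkimPTag=True, SkimETag=SkimETag, SkimSTag=SkimSTag) + "_" + Tag
--         else:
--             return GetAMITagsMC(DS, SkimPTag=True, SkimETag=SkimETag, SkimSTag=SkimSTag)
--     return Tag
-- ===== SOURCE B (Python) =====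
-- def GetAMITagsMC(DS, SkimPTag=False, SkimETag=True, SkimSTag=True):
--     tokens = DS[DS.rfind(".") + 1:].split("_")
--     rem = tokens
--     if SkimETag:
--         while len(rem) > 1 and any("e" in t for t in rem):
--             rem = rem[1:]
--     if SkimSTag:
--         while len(rem) > 1 and any("s" in t for t in rem):
--             rem = rem[1:]
--         while len(rem) > 1 and any("a" in t for t in rem):
--             rem = rem[1:]
--     kept = [rem[0]]
--     for t in rem[1:]:
--         if t.startswith("p"):
--             break
--         kept.append(t)
--     core = "_".join(kept)
--     if SkimPTag:
--         return core
--     pt = [i for i in range(1, len(tokens)) if tokens[i].startswith("p")]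
--     if not pt:
--         return core
--     return core + "_" + "_".join(tokens[pt[0]:pt[-1] + 1])
-- ===== Notes on version B (the rewrite author's own statement) =====
-- stated objective: alternative
-- what changed: B splits the tag once into '_'-separated tokens and works with list operations (drop leading tokens, take kept tokens, first/last p-token indices) instead of A's repeated whole-string find/rfind/slice index arithmetic and its recursion on SkimPTag.
import Mathlib
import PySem

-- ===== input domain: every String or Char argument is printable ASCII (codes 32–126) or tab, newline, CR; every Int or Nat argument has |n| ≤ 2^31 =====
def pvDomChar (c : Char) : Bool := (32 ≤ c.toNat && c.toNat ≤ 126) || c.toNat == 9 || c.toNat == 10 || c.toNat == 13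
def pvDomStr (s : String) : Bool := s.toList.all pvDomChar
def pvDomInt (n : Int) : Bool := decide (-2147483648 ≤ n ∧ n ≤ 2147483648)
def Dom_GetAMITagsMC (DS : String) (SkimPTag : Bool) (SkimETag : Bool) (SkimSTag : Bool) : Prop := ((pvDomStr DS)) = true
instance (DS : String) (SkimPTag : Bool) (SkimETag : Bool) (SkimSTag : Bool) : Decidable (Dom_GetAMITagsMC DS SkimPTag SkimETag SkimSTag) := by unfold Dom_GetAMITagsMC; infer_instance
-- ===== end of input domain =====

-- B replaces A's repeated whole-string find/rfind index arithmetic by one split of the tag into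
-- '_'-separated tokens and list operations on that token list (objective: alternative, same cost).

-- ===== PORT A =====
-- A's while-loops can fail to make progress (then Python loops forever; Pre_ excludes exactly that);
-- each loop is ported with a fuel counter length+1, which reproduces every terminating run exactly.
-- 'Tag[k:]' with k ≥ 0 is List.drop k, 'Tag[:k]' with k ≥ 0 is List.take k (indices here are ≥ 0:
-- find(...)+1 ≥ 0 always, and each take's rfind is ≥ 0 whenever its loop body runs).

-- while flag and Tag.find(c) != -1: Tag = Tag[Tag.find("_") + 1:]
def aDropLoop (flag : Bool) (c : Char) : Nat → List Char → List Char
  | 0, t => t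
  | fuel+1, t =>
      if flag = true ∧ PySem.Chars.find t [c] ≠ -1 then
        aDropLoop flag c fuel (t.drop (PySem.Chars.find t ['_'] + 1).toNat)
      else t

-- while Tag.rfind("_p") != -1: Tag = Tag[:Tag.rfind("_p")]
def aPTrim : Nat → List Char → List Char
  | 0, t => t
  | fuel+1, t =>
      if PySem.Chars.rfind t ['_', 'p'] ≠ -1 then
        aPTrim fuel (t.take (PySem.Chars.rfind t ['_', 'p']).toNat)
      else t

-- while Tag.rfind("_p") != Tag.rfind("_"): Tag = Tag[:Tag.rfind("_")]
def aTailTrim : Nat → List Char → List Char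
  | 0, t => t
  | fuel+1, t =>
      if PySem.Chars.rfind t ['_', 'p'] ≠ PySem.Chars.rfind t ['_'] then
        aTailTrim fuel (t.take (PySem.Chars.rfind t ['_']).toNat)
      else t

def GetAMITagsMC (DS : String) (SkimPTag : Bool) (SkimETag : Bool) (SkimSTag : Bool) : String :=
  let tag := DS.toList.drop (PySem.Chars.rfind DS.toList ['.'] + 1).toNat
  if SkimPTag then
    let t1 := aDropLoop SkimETag 'e' (tag.length + 1) tag
    let t2 := aDropLoop SkimSTag 's' (t1.length + 1) t1
    let t3 := aDropLoop SkimSTag 'a' (t2.length + 1) t2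
    String.ofList (aPTrim (t3.length + 1) t3)
  else
    if PySem.Chars.rfind tag ['_', 'p'] ≠ -1 then
      let u0 := tag.drop (PySem.Chars.find tag ['_', 'p']).toNat
      let u1 := aTailTrim (u0.length + 1) u0
      let u2 := if PySem.Chars.startswith u1 ['_'] then u1.drop 1 else u1
      String.ofList ((GetAMITagsMC DS true SkimETag SkimSTag).toList ++ '_' :: u2)
    else
      GetAMITagsMC DS true SkimETag SkimSTag
termination_by (if SkimPTag then 0 else 1)
decreasing_by all_goals simp_all

-- ===== PORT B =====
def bStartsP (t : List Char) : Bool := PySem.Chars.startswith t ['p']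

-- while len(rem) > 1 and any(c in t for t in rem): rem = rem[1:]
def bDropTokens (c : Char) : List (List Char) → List (List Char)
  | [] => []
  | [t] => [t]
  | t :: u :: ts => if (t :: u :: ts).any (fun x => x.contains c) then bDropTokens c (u :: ts) else t :: u :: ts

-- for t in rem[1:]: if t.startswith("p"): break ... kept.append(t)
def bKept : List (List Char) → List (List Char)
  | [] => []
  | t :: ts => if bStartsP t then [] else t :: bKept ts

def GetAMITagsMC_alt (DS : String) (SkimPTag : Bool) (SkimETag : Bool) (SkimSTag : Bool) : String :=
  let tokens := PySem.Chars.splitOn (DS.toList.drop (PySem.Chars.rfind DS.toList ['.'] + 1).toNat) ['_']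
  let rem0 := if SkimETag then bDropTokens 'e' tokens else tokens
  let rem := if SkimSTag then bDropTokens 'a' (bDropTokens 's' rem0) else rem0
  let core := PySem.Chars.join ['_'] (rem.headD [] :: bKept rem.tail)
  if SkimPTag then String.ofList core
  else
    let pt := (PySem.List.pyRange 1 (tokens.length : Int)).filter
        (fun i => bStartsP (PySem.List.pyGetD tokens i []))
    if pt.isEmpty then String.ofList core
    else
      String.ofList (core ++ '_' :: PySem.Chars.join ['_']
        (PySem.List.slice tokens (some (pt.headD 0)) (some (pt.getLastD 0 + 1))))

-- ===== PRECONDITION & SPEC =====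
-- Pre_ excludes exactly the inputs on which Python A never returns: when the last '_'-token of the
-- tag contains a skimmed letter ('e' with SkimETag, 's' or 'a' with SkimSTag), A's corresponding
-- while-loop stops making progress and Python loops forever; Pre_ admits every input A returns on.
def Pre_GetAMITagsMC (DS : String) (SkimPTag : Bool) (SkimETag : Bool) (SkimSTag : Bool) : Prop :=
  let last := (PySem.Chars.splitOn (DS.toList.drop (PySem.Chars.rfind DS.toList ['.'] + 1).toNat) ['_']).getLastD []
  (SkimETag = true → 'e' ∉ last) ∧ (SkimSTag = true → 's' ∉ last ∧ 'a' ∉ last)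
instance (DS : String) (SkimPTag : Bool) (SkimETag : Bool) (SkimSTag : Bool) : Decidable (Pre_GetAMITagsMC DS SkimPTag SkimETag SkimSTag) := by unfold Pre_GetAMITagsMC; infer_instance

def pvWitness_GetAMITagsMC : String × Bool × Bool × Bool := ("mc16_13TeV.310780.Pythia8.deriv.DAOD_EXOT24.e7110_s3126_r10724_p4090", false, true, true)

def Spec_GetAMITagsMC (DS : String) (SkimPTag : Bool) (SkimETag : Bool) (SkimSTag : Bool) (out : String) : Prop := out = GetAMITagsMC_alt DS SkimPTag SkimETag SkimSTag
instance (DS : String) (SkimPTag : Bool) (SkimETag : Bool) (SkimSTag : Bool) (out : String) : Decidable (Spec_GetAMITagsMC DS SkimPTag SkimETag SkimSTag out) := by unfold Spec_GetAMITagsMC; infer_instance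

-- ===== CLAIM (what is proved, stated in full; the proofs are below) =====
def Claim_equal_GetAMITagsMC : Prop := ∀ (DS : String) (SkimPTag : Bool) (SkimETag : Bool) (SkimSTag : Bool), Dom_GetAMITagsMC DS SkimPTag SkimETag SkimSTag → Pre_GetAMITagsMC DS SkimPTag SkimETag SkimSTag → Spec_GetAMITagsMC DS SkimPTag SkimETag SkimSTag (GetAMITagsMC DS SkimPTag SkimETag SkimSTag)

-- ===== LEMMAS AND PROOFS =====

-- abbreviations used only by the proofs
def J (ts : List (List Char)) : List Char := PySem.Chars.join ['_'] ts
def Clean (ts : List (List Char)) : Prop := ∀ t ∈ ts, '_' ∉ t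
-- index of the separator standing before token i (0 < i < ts.length)
def posJ (ts : List (List Char)) (i : Nat) : Nat := (J (ts.take i)).length
-- "token i exists, is not the first one, and starts with 'p'"
def PIx (ts : List (List Char)) (i : Nat) : Prop := 0 < i ∧ i < ts.length ∧ bStartsP (ts.getD i []) = true

-- ---- splitOn s ['_'] : the three facts the proofs need ----
def mySplit (c : Char) : List Char → List Char → List (List Char)
  | cur, [] => [cur]
  | cur, x :: xs => if x = c then cur :: mySplit c [] xs else mySplit c (cur ++ [x]) xs

theorem splitOn_go_eq (c : Char) : ∀ (fuel : Nat) (l cur : List Char) (acc : List (List Char)),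
    l.length < fuel →
    PySem.Chars.splitOn.go [c] fuel l cur acc = acc.reverse ++ mySplit c cur.reverse l := by
  intro fuel
  induction fuel with
  | zero => intro l cur acc h; omega
  | succ n ih =>
    intro l cur acc h
    match l with
    | [] => rw [PySem.Chars.splitOn.go]; simp [mySplit]; omega
    | x :: xs =>
      rw [PySem.Chars.splitOn.go]
      by_cases hx : x = c
      · subst hx
        simp only [List.isPrefixOf, List.isPrefixOf_nil_left, beq_self_eq_true, Bool.true_and,
          if_pos]
        rw [ih _ _ _ (by simpa using Nat.lt_of_succ_lt_succ h)]
        simp [mySplit]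
      · have : ([c].isPrefixOf (x :: xs)) = false := by
          simp [List.isPrefixOf]; exact fun hc => absurd hc.symm hx
        simp only [this, Bool.false_eq_true, if_neg, if_false]
        rw [ih _ _ _ (by simpa using Nat.lt_of_succ_lt_succ h)]
        simp [mySplit, hx]

theorem splitOn_eq_mySplit (c : Char) (s : List Char) :
    PySem.Chars.splitOn s [c] = mySplit c [] s := by
  unfold PySem.Chars.splitOn
  rw [splitOn_go_eq c _ _ _ _ (by omega)]
  simp

theorem mySplit_ne_nil (c : Char) (cur s : List Char) : mySplit c cur s ≠ [] := by
  induction s generalizing cur with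
  | nil => simp [mySplit]
  | cons x xs ih => by_cases hx : x = c <;> simp [mySplit, hx]; exact ih _

theorem join_mySplit (c : Char) (cur s : List Char) :
    PySem.Chars.join [c] (mySplit c cur s) = cur ++ s := by
  induction s generalizing cur with
  | nil => simp [mySplit, PySem.Chars.join_singleton]
  | cons x xs ih =>
    by_cases hx : x = c
    · subst hx
      have hstep : mySplit x cur (x :: xs) = cur :: mySplit x [] xs := by simp [mySplit]
      rw [hstep]
      obtain ⟨t, ts, hts⟩ := List.exists_cons_of_ne_nil (mySplit_ne_nil x [] xs)
      rw [hts, PySem.Chars.join_cons_cons, ← hts, ih]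
      simp
    · simp only [mySplit, if_neg hx]
      rw [ih]
      simp

theorem mySplit_clean (c : Char) (cur s : List Char) (h : c ∉ cur) :
    ∀ t ∈ mySplit c cur s, c ∉ t := by
  induction s generalizing cur with
  | nil => simpa [mySplit] using h
  | cons x xs ih =>
    by_cases hx : x = c
    · subst hx
      have hstep : mySplit x cur (x :: xs) = cur :: mySplit x [] xs := by simp [mySplit]
      rw [hstep]
      intro t ht
      rcases List.mem_cons.mp ht with ht | ht
      · subst ht; exact h
      · exact ih [] (by simp) t ht
    · simp only [mySplit, if_neg hx]
      exact ih (cur ++ [x]) (by simp [h]; exact fun hc => absurd hc.symm hx)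

-- ---- find / rfind characterizations ----
theorem find_eq_of (s sub : List Char) (k : Nat) (h1 : sub <+: s.drop k)
    (h2 : ∀ i < k, ¬ sub <+: s.drop i) : PySem.Chars.find s sub = (k : Int) := by
  have hin : sub <:+: s := by
    rw [← PySem.Chars.isIn_iff_infix, ← PySem.Chars.exists_prefix_drop_iff_isIn]
    exact ⟨k, h1⟩
  have h0 : 0 ≤ PySem.Chars.find s sub := (PySem.Chars.find_nonneg_iff s sub).mpr hin
  obtain ⟨hp, hmin⟩ := PySem.Chars.find_spec h0
  have hkk : (PySem.Chars.find s sub).toNat = k := by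
    rcases Nat.lt_trichotomy (PySem.Chars.find s sub).toNat k with h | h | h
    · exact absurd hp (h2 _ h)
    · exact h
    · exact absurd h1 (hmin _ h)
  omega

theorem rfind_go_eq (s sub : List Char) (k : Nat) :
    ∀ j : Nat, k ≤ j → sub <+: s.drop k → (∀ i, k < i → i ≤ j → ¬ sub <+: s.drop i) →
    PySem.Chars.rfind.go s sub j = (k : Int) := by
  intro j
  induction j with
  | zero =>
    intro hk h1 _
    interval_cases k
    rw [PySem.Chars.rfind.go]
    simp only [List.drop_zero] at h1
    simp [List.isPrefixOf_iff_prefix.mpr h1]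
  | succ n ih =>
    intro hk h1 h2
    rw [PySem.Chars.rfind.go]
    by_cases hp : sub <+: List.drop (n + 1) s
    · have : k = n + 1 := by
        by_contra hne
        exact h2 (n+1) (by omega) (by omega) hp
      simp [List.isPrefixOf_iff_prefix.mpr hp, this]
    · have hpf : sub.isPrefixOf (List.drop (n + 1) s) = false := by
        rw [← Bool.not_eq_true, List.isPrefixOf_iff_prefix]; exact hp
      have hkn : k ≤ n := by
        by_contra hgt
        have : k = n + 1 := by omega
        exact hp (this ▸ h1)
      simp only [hpf, Bool.false_eq_true, if_false]
      exact ih hkn h1 (fun i hi hin => h2 i hi (by omega))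

theorem rfind_go_neg (s sub : List Char) :
    ∀ j : Nat, (∀ i ≤ j, ¬ sub <+: s.drop i) → PySem.Chars.rfind.go s sub j = -1 := by
  intro j
  induction j with
  | zero =>
    intro h
    rw [PySem.Chars.rfind.go]
    have : sub.isPrefixOf s = false := by
      rw [← Bool.not_eq_true, List.isPrefixOf_iff_prefix]
      simpa using h 0 (by omega)
    simp [this]
  | succ n ih =>
    intro h
    rw [PySem.Chars.rfind.go]
    have : sub.isPrefixOf (List.drop (n+1) s) = false := by
      rw [← Bool.not_eq_true, List.isPrefixOf_iff_prefix]
      exact h (n+1) (by omega)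
    simp only [this, Bool.false_eq_true, if_false]
    exact ih (fun i hi => h i (by omega))

theorem rfind_eq_of (s sub : List Char) (k : Nat) (hk : k ≤ s.length) (h1 : sub <+: s.drop k)
    (h2 : ∀ i, k < i → ¬ sub <+: s.drop i) : PySem.Chars.rfind s sub = (k : Int) := by
  unfold PySem.Chars.rfind
  exact rfind_go_eq s sub k s.length hk h1 (fun i hi _ => h2 i hi)

theorem rfind_eq_neg_of (s sub : List Char) (h : ∀ i, ¬ sub <+: s.drop i) :
    PySem.Chars.rfind s sub = -1 := by
  unfold PySem.Chars.rfind
  exact rfind_go_neg s sub s.length (fun i _ => h i)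

-- ---- structure of J ----
theorem J_cons_cons (t u : List Char) (ts : List (List Char)) :
    J (t :: u :: ts) = t ++ '_' :: J (u :: ts) := by
  show PySem.Chars.join ['_'] _ = _
  rw [PySem.Chars.join_cons_cons]
  simp [J]

theorem J_cons (t : List Char) (ts : List (List Char)) (h : ts ≠ []) :
    J (t :: ts) = t ++ '_' :: J ts := by
  obtain ⟨u, us, rfl⟩ := List.exists_cons_of_ne_nil h
  exact J_cons_cons t u us

theorem J_split (ts : List (List Char)) (i : Nat) (h0 : 0 < i) (h : i < ts.length) :
    J ts = J (ts.take i) ++ '_' :: J (ts.drop i) := by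
  induction ts generalizing i with
  | nil => simp at h
  | cons t tl ih =>
    match i, h0 with
    | 1, _ =>
      have htl : tl ≠ [] := by
        intro hn; rw [hn] at h; simp at h
      simp only [List.take_succ_cons, List.take_zero, List.drop_succ_cons, List.drop_zero]
      rw [J_cons t tl htl]
      simp [J, PySem.Chars.join_singleton]
    | (m+2), _ =>
      have hm : m + 1 < tl.length := by simpa using h
      have htl : tl ≠ [] := by intro hn; rw [hn] at hm; simp at hm
      have h1 : J (t :: tl) = t ++ '_' :: J tl := J_cons t tl htl
      have h2 : J (t :: tl.take (m+1)) = t ++ '_' :: J (tl.take (m+1)) := by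
        apply J_cons
        have : 0 < (tl.take (m+1)).length := by simp; omega
        intro hn; rw [hn] at this; simp at this
      simp only [List.take_succ_cons, List.drop_succ_cons]
      rw [h2, h1, ih (m+1) (by omega) hm]
      simp

theorem posJ_ge (ts : List (List Char)) (t : List Char) (i : Nat) (h0 : 0 < i) :
    t.length ≤ posJ (t :: ts) i := by
  unfold posJ
  match i, h0 with
  | (m+1), _ =>
    simp only [List.take_succ_cons]
    by_cases hm : ts.take m = []
    · rw [hm]; simp [J, PySem.Chars.join_singleton]
    · rw [J_cons t _ hm]; simp

theorem posJ_lt_posJ (ts : List (List Char)) (i i' : Nat) (h0 : 0 < i) (hii : i < i')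
    (h : i' ≤ ts.length) : posJ ts i < posJ ts i' := by
  have h1 : (ts.take i').take i = ts.take i := by
    rw [List.take_take]; congr 1; omega
  have h2 : J (ts.take i') = J ((ts.take i').take i) ++ '_' :: J ((ts.take i').drop i) := by
    apply J_split _ i h0
    simp; omega
  unfold posJ
  rw [h2, h1]
  simp

theorem posJ_lt_len (ts : List (List Char)) (i : Nat) (h0 : 0 < i) (h : i < ts.length) :
    posJ ts i < (J ts).length := by
  have h2 := J_split ts i h0 h
  unfold posJ
  rw [h2]
  simp

theorem mem_J (c : Char) (ts : List (List Char)) (hc : c ≠ '_') :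
    c ∈ J ts ↔ ∃ t ∈ ts, c ∈ t := by
  induction ts with
  | nil => simp [J, PySem.Chars.join_nil]
  | cons t tl ih =>
    by_cases htl : tl = []
    · subst htl; simp [J, PySem.Chars.join_singleton]
    · rw [J_cons t tl htl]
      simp only [List.mem_append, List.mem_cons]
      constructor
      · rintro (h | h | h)
        · exact ⟨t, by simp, h⟩
        · exact absurd h hc
        · obtain ⟨u, hu, hcu⟩ := ih.mp h
          exact ⟨u, by simp [hu], hcu⟩
      · rintro ⟨u, hu, hcu⟩
        rcases hu with h' | hu
        · exact Or.inl (h' ▸ hcu)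
        · exact Or.inr (Or.inr (ih.mpr ⟨u, hu, hcu⟩))

theorem headJ_p (ts : List (List Char)) (h : ts ≠ []) :
    (['p'] <+: J ts) ↔ bStartsP (ts.headD []) = true := by
  obtain ⟨t, tl, rfl⟩ := List.exists_cons_of_ne_nil h
  by_cases ht : t = []
  · subst ht
    by_cases htl : tl = []
    · subst htl
      simp [J, PySem.Chars.join_singleton, bStartsP, PySem.Chars.startswith, List.isPrefixOf]
    · rw [J_cons [] tl htl]
      simp only [List.nil_append, List.headD_cons]
      constructor
      · intro hp
        obtain ⟨r, hr⟩ := hp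
        simp at hr
      · intro hp; simp [bStartsP, PySem.Chars.startswith, List.isPrefixOf] at hp
  · obtain ⟨c, cs, rfl⟩ := List.exists_cons_of_ne_nil ht
    have hhead : ∃ r, J ((c :: cs) :: tl) = c :: r := by
      by_cases htl : tl = []
      · subst htl; exact ⟨cs, by simp [J, PySem.Chars.join_singleton]⟩
      · rw [J_cons _ tl htl]; exact ⟨cs ++ '_' :: J tl, by simp⟩
    obtain ⟨r, hr⟩ := hhead
    rw [hr]
    simp only [List.headD_cons]
    constructor
    · intro hp
      obtain ⟨q, hq⟩ := hp
      simp only [List.singleton_append, List.cons.injEq] at hq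
      simp [bStartsP, PySem.Chars.startswith, List.isPrefixOf, hq.1.symm]
    · intro hp
      simp only [bStartsP, PySem.Chars.startswith, List.isPrefixOf, Bool.and_eq_true, beq_iff_eq] at hp
      exact ⟨r, by simp [hp.1.symm]⟩

theorem posJ_cons (t : List Char) (tl : List (List Char)) (i : Nat) (h0 : 0 < i) (htl : tl ≠ []) :
    posJ (t :: tl) (i+1) = t.length + 1 + posJ tl i := by
  unfold posJ
  simp only [List.take_succ_cons]
  rw [J_cons t _ (by
    intro hn
    rcases List.exists_cons_of_ne_nil htl with ⟨u, us, rfl⟩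
    match i, h0 with
    | (m+1), _ => simp at hn)]
  simp
  omega

-- occurrence characterizations: where '_' / "_p" occur inside J ts
theorem occ_us (ts : List (List Char)) (hcl : Clean ts) (k : Nat) :
    (['_'] <+: (J ts).drop k) ↔ ∃ i, 0 < i ∧ i < ts.length ∧ k = posJ ts i := by
  induction ts generalizing k with
  | nil => simp [J, PySem.Chars.join_nil]
  | cons t tl ih =>
    by_cases htl : tl = []
    · subst htl
      constructor
      · intro hp
        exfalso
        have hmem : '_' ∈ t := by
          have h1 : '_' ∈ (J [t]).drop k := hp.subset (by simp)
          have := List.drop_subset (l := J [t]) k h1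
          simpa [J, PySem.Chars.join_singleton] using this
        exact hcl t (by simp) hmem
      · rintro ⟨i, h1, h2, _⟩; simp at h2; omega
    · have hJ : J (t :: tl) = t ++ '_' :: J tl := J_cons t tl htl
      rcases Nat.lt_trichotomy k t.length with hk | hk | hk
      · constructor
        · intro hp
          exfalso
          have hne : t.drop k ≠ [] := by simp; omega
          obtain ⟨c, cs, hcs⟩ := List.exists_cons_of_ne_nil hne
          have hdrop : (J (t :: tl)).drop k = t.drop k ++ '_' :: J tl := by
            rw [hJ, List.drop_append_of_le_length (by omega)]
          rw [hdrop, hcs] at hp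
          rcases List.cons_prefix_iff.mp hp with ⟨r, hr, _⟩
          simp only [List.cons_append, List.cons.injEq] at hr
          have : '_' ∈ t := by
            have : '_' ∈ t.drop k := by rw [hcs, ← hr.1]; simp
            exact List.drop_subset (l := t) k this
          exact hcl t (by simp) this
        · rintro ⟨i, h1, h2, h3⟩
          have := posJ_ge tl t i h1
          omega
      · constructor
        · intro _
          refine ⟨1, by omega, by simp; exact List.length_pos_iff.mpr htl, ?_⟩
          simp [posJ, J, PySem.Chars.join_singleton, hk]
        · intro _
          have hdrop : (J (t :: tl)).drop k = '_' :: J tl := by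
            rw [hJ, hk]
            simp
          rw [hdrop]
          exact ⟨J tl, rfl⟩
      · have hdrop : (J (t :: tl)).drop k = (J tl).drop (k - t.length - 1) := by
          rw [hJ, List.drop_append]
          have h1 : t.drop k = [] := by simp; omega
          have h2 : ('_' :: J tl).drop (k - t.length) = (J tl).drop (k - t.length - 1) := by
            have : k - t.length = (k - t.length - 1) + 1 := by omega
            rw [this]
            simp
          rw [h1, h2]
          simp
        rw [hdrop, ih (fun u hu => hcl u (by simp [hu])) (k - t.length - 1)]
        constructor
        · rintro ⟨i, h1, h2, h3⟩
          refine ⟨i + 1, by omega, by simp; omega, ?_⟩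
          rw [posJ_cons t tl i h1 htl]
          omega
        · rintro ⟨i, h1, h2, h3⟩
          match i, h1 with
          | 1, _ =>
            exfalso
            have : posJ (t :: tl) 1 = t.length := by simp [posJ, J, PySem.Chars.join_singleton]
            omega
          | (m+2), _ =>
            refine ⟨m + 1, by omega, by simp at h2; omega, ?_⟩
            rw [posJ_cons t tl (m+1) (by omega) htl] at h3
            omega

theorem occ_p (ts : List (List Char)) (hcl : Clean ts) (k : Nat) :
    (['_', 'p'] <+: (J ts).drop k) ↔ ∃ i, PIx ts i ∧ k = posJ ts i := by
  induction ts generalizing k with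
  | nil => simp [J, PySem.Chars.join_nil, PIx]
  | cons t tl ih =>
    by_cases htl : tl = []
    · subst htl
      constructor
      · intro hp
        exfalso
        have hmem : '_' ∈ t := by
          have h1 : '_' ∈ (J [t]).drop k := hp.subset (by simp)
          have := List.drop_subset (l := J [t]) k h1
          simpa [J, PySem.Chars.join_singleton] using this
        exact hcl t (by simp) hmem
      · rintro ⟨i, ⟨h1, h2, _⟩, _⟩; simp at h2; omega
    · have hJ : J (t :: tl) = t ++ '_' :: J tl := J_cons t tl htl
      rcases Nat.lt_trichotomy k t.length with hk | hk | hk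
      · constructor
        · intro hp
          exfalso
          have hne : t.drop k ≠ [] := by simp; omega
          obtain ⟨c, cs, hcs⟩ := List.exists_cons_of_ne_nil hne
          have hdrop : (J (t :: tl)).drop k = t.drop k ++ '_' :: J tl := by
            rw [hJ, List.drop_append_of_le_length (by omega)]
          rw [hdrop, hcs] at hp
          rcases List.cons_prefix_iff.mp hp with ⟨r, hr, _⟩
          simp only [List.cons_append, List.cons.injEq] at hr
          have : '_' ∈ t := by
            have : '_' ∈ t.drop k := by rw [hcs, ← hr.1]; simp
            exact List.drop_subset (l := t) k this
          exact hcl t (by simp) this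
        · rintro ⟨i, ⟨h1, h2, h3⟩, h4⟩
          have := posJ_ge tl t i h1
          omega
      · have hdrop : (J (t :: tl)).drop k = '_' :: J tl := by
          rw [hJ, hk]
          simp
        rw [hdrop]
        constructor
        · intro hp
          rcases List.cons_prefix_iff.mp hp with ⟨r, hr, hpr⟩
          simp only [List.cons.injEq] at hr
          have hps : bStartsP (tl.headD []) = true := by
            rw [← headJ_p tl htl]
            rw [← hr.2] at hpr
            exact hpr
          refine ⟨1, ⟨by omega, by simp; exact List.length_pos_iff.mpr htl, ?_⟩, ?_⟩
          · obtain ⟨u, us, rfl⟩ := List.exists_cons_of_ne_nil htl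
            simpa using hps
          · simp [posJ, J, PySem.Chars.join_singleton, hk]
        · rintro ⟨i, ⟨h1, h2, h3⟩, h4⟩
          have hi1 : i = 1 := by
            by_contra hne
            have : posJ (t :: tl) 1 < posJ (t :: tl) i := by
              apply posJ_lt_posJ _ 1 i (by omega) (by omega) (by omega)
            have : posJ (t :: tl) 1 = t.length := by simp [posJ, J, PySem.Chars.join_singleton]
            omega
          subst hi1
          have hps : (['p'] <+: J tl) := by
            rw [headJ_p tl htl]
            obtain ⟨u, us, rfl⟩ := List.exists_cons_of_ne_nil htl
            simpa using h3
          obtain ⟨r, hr⟩ := hps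
          exact ⟨r, by rw [← hr]; rfl⟩
      · have hdrop : (J (t :: tl)).drop k = (J tl).drop (k - t.length - 1) := by
          rw [hJ, List.drop_append]
          have h1 : t.drop k = [] := by simp; omega
          have h2 : ('_' :: J tl).drop (k - t.length) = (J tl).drop (k - t.length - 1) := by
            have : k - t.length = (k - t.length - 1) + 1 := by omega
            rw [this]
            simp
          rw [h1, h2]
          simp
        rw [hdrop, ih (fun u hu => hcl u (by simp [hu])) (k - t.length - 1)]
        constructor
        · rintro ⟨i, ⟨h1, h2, h3⟩, h4⟩
          refine ⟨i + 1, ⟨by omega, by simp; omega, by simpa using h3⟩, ?_⟩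
          rw [posJ_cons t tl i h1 htl]
          omega
        · rintro ⟨i, ⟨h1, h2, h3⟩, h4⟩
          match i, h1 with
          | 1, _ =>
            exfalso
            have : posJ (t :: tl) 1 = t.length := by simp [posJ, J, PySem.Chars.join_singleton]
            omega
          | (m+2), _ =>
            refine ⟨m + 1, ⟨by omega, by simp at h2; omega, by simpa using h3⟩, ?_⟩
            rw [posJ_cons t tl (m+1) (by omega) htl] at h4
            omega

-- ---- small derived facts ----
theorem aDropLoop_false (c : Char) (fuel : Nat) (t : List Char) :
    aDropLoop false c fuel t = t := by
  cases fuel <;> simp [aDropLoop]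

theorem find_single_ne (s : List Char) (c : Char) :
    (PySem.Chars.find s [c] ≠ -1) ↔ c ∈ s := by
  rw [Ne, PySem.Chars.find_eq_neg_one_iff, List.singleton_infix_iff]
  tauto

theorem find_us_val (t : List Char) (tl : List (List Char)) (htl : tl ≠ [])
    (hcl : Clean (t :: tl)) : PySem.Chars.find (J (t :: tl)) ['_'] = (t.length : Int) := by
  apply find_eq_of
  · rw [J_cons t tl htl]
    simp
  · intro i hi hp
    obtain ⟨i', h1, h2, h3⟩ := (occ_us (t :: tl) hcl i).mp hp
    have := posJ_ge tl t i' h1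
    omega

theorem drop_sep (t : List Char) (tl : List (List Char)) (htl : tl ≠ []) :
    (J (t :: tl)).drop (t.length + 1) = J tl := by
  rw [J_cons t tl htl, List.drop_append]
  simp

theorem J_len_cons (t : List Char) (tl : List (List Char)) (htl : tl ≠ []) :
    (J (t :: tl)).length = t.length + 1 + (J tl).length := by
  rw [J_cons t tl htl]
  simp
  omega

theorem bDrop_ne_nil (c : Char) (ts : List (List Char)) (h : ts ≠ []) :
    bDropTokens c ts ≠ [] := by
  induction ts with
  | nil => simp at h
  | cons t tl ih =>
    match tl with
    | [] => simp [bDropTokens]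
    | u :: us =>
      rw [bDropTokens]
      split
      · exact ih (by simp)
      · simp

theorem bDrop_clean (c : Char) (ts : List (List Char)) (h : Clean ts) :
    Clean (bDropTokens c ts) := by
  induction ts with
  | nil => simpa [bDropTokens] using h
  | cons t tl ih =>
    match tl with
    | [] => simpa [bDropTokens] using h
    | u :: us =>
      rw [bDropTokens]
      split
      · exact ih (fun x hx => h x (by simp [List.mem_cons] at hx ⊢; tauto))
      · exact h

theorem bDrop_getLastD (c : Char) (ts : List (List Char)) (h : ts ≠ []) :
    (bDropTokens c ts).getLastD [] = ts.getLastD [] := by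
  induction ts with
  | nil => simp at h
  | cons t tl ih =>
    match tl with
    | [] => simp [bDropTokens]
    | u :: us =>
      rw [bDropTokens]
      split
      · rw [ih (by simp)]
        simp
      · rfl

theorem aDropLoop_eq (c : Char) (hc : c ≠ '_') :
    ∀ (ts : List (List Char)) (fuel : Nat), Clean ts → ts ≠ [] →
    c ∉ ts.getLastD [] → (J ts).length < fuel →
    aDropLoop true c fuel (J ts) = J (bDropTokens c ts) := by
  intro ts
  induction ts with
  | nil => intro fuel _ h; simp at h
  | cons t tl ih =>
    intro fuel hcl _ hlast hfuel
    match fuel, hfuel with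
    | f + 1, _ =>
      rw [aDropLoop]
      match tl with
      | [] =>
        have hct : c ∉ t := by simpa using hlast
        have hcond : ¬ (PySem.Chars.find (J [t]) [c] ≠ -1) := by
          rw [find_single_ne]
          simpa [J, PySem.Chars.join_singleton] using hct
        rw [if_neg (by tauto)]
        simp [bDropTokens]
      | u :: us =>
        have htl : (u :: us : List (List Char)) ≠ [] := by simp
        by_cases hany : ∃ x ∈ t :: u :: us, c ∈ x
        · have hcond : PySem.Chars.find (J (t :: u :: us)) [c] ≠ -1 := by
            rw [find_single_ne, mem_J c _ hc]
            exact hany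
          rw [if_pos ⟨rfl, hcond⟩, find_us_val t _ htl hcl]
          have harg : ((t.length : Int) + 1).toNat = t.length + 1 := by omega
          rw [harg, drop_sep t _ htl]
          have hlast' : c ∉ (u :: us).getLastD [] := by simpa using hlast
          have hlen := J_len_cons t _ htl
          rw [ih f (fun x hx => hcl x (by simp [List.mem_cons] at hx ⊢; tauto)) htl hlast' (by omega)]
          have hb : bDropTokens c (t :: u :: us) = bDropTokens c (u :: us) := by
            rw [bDropTokens, if_pos]
            rw [List.any_eq_true]
            obtain ⟨x, hx, hcx⟩ := hany
            exact ⟨x, hx, by simpa using hcx⟩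
          rw [hb]
        · have hcond : ¬ PySem.Chars.find (J (t :: u :: us)) [c] ≠ -1 := by
            rw [find_single_ne, mem_J c _ hc]
            exact hany
          rw [if_neg (by tauto)]
          have hb : bDropTokens c (t :: u :: us) = t :: u :: us := by
            rw [bDropTokens, if_neg]
            rw [List.any_eq_true]
            rintro ⟨x, hx, hcx⟩
            exact hany ⟨x, hx, by simpa using hcx⟩
          rw [hb]

theorem bKept_id (l : List (List Char)) (h : ∀ u ∈ l, bStartsP u = false) :
    bKept l = l := by
  induction l with
  | nil => rfl
  | cons u us ih =>
    rw [bKept, if_neg (by simp [h u (by simp)])]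
    rw [ih (fun x hx => h x (by simp [hx]))]

theorem bKept_take (l : List (List Char)) (m : Nat) (hm : m < l.length)
    (hP : bStartsP (l.getD m []) = true)
    (hmax : ∀ i, m < i → i < l.length → bStartsP (l.getD i []) = false) :
    bKept (l.take m) = bKept l := by
  induction l generalizing m with
  | nil => simp at hm
  | cons u us ih =>
    match m with
    | 0 =>
      simp only [List.take_zero]
      have h1 : bKept (u :: us) = [] := by rw [bKept, if_pos (by simpa using hP)]
      rw [h1, bKept]
    | m' + 1 =>
      simp only [List.take_succ_cons]
      rw [bKept, bKept]
      split
      · rfl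
      · congr 1
        apply ih m' (by simpa using hm) (by simpa using hP)
        intro i hi hilen
        have := hmax (i + 1) (by omega) (by simpa using hilen)
        simpa using this

theorem take_posJ (ts : List (List Char)) (i : Nat) (h0 : 0 < i) (h : i < ts.length) :
    (J ts).take (posJ ts i) = J (ts.take i) := by
  rw [J_split ts i h0 h]
  show (J (ts.take i) ++ '_' :: J (ts.drop i)).take (J (ts.take i)).length = _
  exact List.take_left

theorem aPTrim_eq : ∀ (n : Nat) (ts : List (List Char)) (fuel : Nat), ts.length ≤ n →
    Clean ts → ts ≠ [] → (J ts).length < fuel →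
    aPTrim fuel (J ts) = J (ts.headD [] :: bKept ts.tail) := by
  intro n
  induction n with
  | zero =>
    intro ts fuel hn _ hne _
    exact absurd (List.length_eq_zero_iff.mp (by omega)) hne
  | succ n ih =>
    intro ts fuel hn hcl hne hfuel
    obtain ⟨h, tl, rfl⟩ := List.exists_cons_of_ne_nil hne
    obtain ⟨f, rfl⟩ : ∃ f, fuel = f + 1 := ⟨fuel - 1, by omega⟩
    match true with
    | _ =>
      rw [aPTrim]
      by_cases hP : ∃ i, PIx (h :: tl) i
      · have hex : ∃ j, PIx (h :: tl) j ∧ ∀ i, PIx (h :: tl) i → i ≤ j := by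
          classical
          haveI : DecidablePred (PIx (h :: tl)) := Classical.decPred _
          obtain ⟨i0, hi0⟩ := hP
          refine ⟨Nat.findGreatest (PIx (h :: tl)) (h :: tl).length,
            Nat.findGreatest_spec (le_of_lt hi0.2.1) hi0, ?_⟩
          intro i hi
          by_contra hgt
          exact Nat.findGreatest_is_greatest (by omega) (le_of_lt hi.2.1) hi
        obtain ⟨j, hj, hjmax⟩ := hex
        have hrf : PySem.Chars.rfind (J (h :: tl)) ['_', 'p'] = (posJ (h :: tl) j : Int) := by
          apply rfind_eq_of _ _ _ (le_of_lt (posJ_lt_len _ j hj.1 hj.2.1))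
          · exact (occ_p _ hcl _).mpr ⟨j, hj, rfl⟩
          · intro i hi hp
            obtain ⟨i', hi', hpe⟩ := (occ_p _ hcl i).mp hp
            have hle : i' ≤ j := hjmax i' hi'
            rcases Nat.lt_or_ge i' j with hlt | hge
            · have := posJ_lt_posJ (h :: tl) i' j hi'.1 hlt (le_of_lt hj.2.1)
              omega
            · have : i' = j := by omega
              subst this
              omega
        rw [if_pos (by rw [hrf]; omega)]
        rw [hrf, Int.toNat_natCast, take_posJ _ j hj.1 hj.2.1]
        have hstep := ih ((h :: tl).take j) f
          (by
            have h2 : j < (h :: tl).length := hj.2.1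
            simp only [List.length_cons] at h2 hn
            simp only [List.length_take, List.length_cons]
            omega)
          (fun x hx => hcl x (List.take_subset _ _ hx))
          (by
            intro hnil
            have h0 : 0 < j := hj.1
            have := congrArg List.length hnil
            simp at this
            omega)
          (by
            have h1 : posJ (h :: tl) j < (J (h :: tl)).length := posJ_lt_len (h :: tl) j hj.1 hj.2.1
            unfold posJ at h1
            omega)
        rw [hstep]
        match j, hj.1 with
        | j' + 1, _ =>
          simp only [List.take_succ_cons, List.headD_cons, List.tail_cons]
          congr 2
          apply bKept_take tl j' (by have := hj.2.1; simp at this ⊢; omega)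
            (by have := hj.2.2; simpa using this)
          intro i hi hilen
          by_contra hb
          have hPix : PIx (h :: tl) (i + 1) := ⟨by omega, by simp; omega,
            by rw [List.getD_cons_succ]; simpa using hb⟩
          have := hjmax (i + 1) hPix
          omega
      · have hrf : PySem.Chars.rfind (J (h :: tl)) ['_', 'p'] = -1 := by
          apply rfind_eq_neg_of
          intro i hp
          exact hP ((occ_p _ hcl i).mp hp |> fun ⟨i', hi', _⟩ => ⟨i', hi'⟩)
        rw [if_neg (by rw [hrf]; simp)]
        simp only [List.headD_cons, List.tail_cons]
        have : bKept tl = tl := by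
          apply bKept_id
          intro u hu
          obtain ⟨m, hm, rfl⟩ := List.mem_iff_getElem.mp hu
          by_contra hb
          exact hP ⟨m + 1, by omega, by simpa using hm,
            by rw [List.getD_cons_succ, List.getD_eq_getElem _ _ hm]; simpa using hb⟩
        rw [this]

theorem getD_take (l : List (List Char)) (m i : Nat) (h : i < m) (hil : i < l.length) :
    (l.take m).getD i [] = l.getD i [] := by
  rw [List.getD_eq_getElem _ _ (by simp; omega), List.getD_eq_getElem _ _ hil]
  exact List.getElem_take

theorem aTailTrim_eq : ∀ (n : Nat) (us : List (List Char)) (fuel : Nat) (j : Nat),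
    us.length ≤ n → Clean us → us ≠ [] →
    j < us.length → bStartsP (us.getD j []) = true →
    (∀ i, j < i → i < us.length → bStartsP (us.getD i []) = false) →
    ('_' :: J us).length < fuel →
    aTailTrim fuel ('_' :: J us) = '_' :: J (us.take (j + 1)) := by
  intro n
  induction n with
  | zero =>
    intro us fuel j hn _ hne _ _ _ _
    exact absurd (List.length_eq_zero_iff.mp (by omega)) hne
  | succ n ih =>
    intro us fuel j hn hcl hne hjlen hjP hjmax hfuel
    obtain ⟨f, rfl⟩ : ∃ f, fuel = f + 1 := ⟨fuel - 1, by omega⟩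
    have hts : Clean ([] :: us) := by
      intro x hx
      rcases List.mem_cons.mp hx with rfl | hx
      · simp
      · exact hcl x hx
    have hJ : J ([] :: us) = '_' :: J us := by
      rw [J_cons [] us hne]
      simp
    have hlen : ([] :: us).length = us.length + 1 := by simp
    have hPIxj : PIx ([] :: us) (j + 1) := by
      refine ⟨by omega, by simp; omega, ?_⟩
      rw [List.getD_cons_succ]
      exact hjP
    have hrfp : PySem.Chars.rfind ('_' :: J us) ['_', 'p'] = (posJ ([] :: us) (j + 1) : Int) := by
      rw [← hJ]
      apply rfind_eq_of _ _ _ (le_of_lt (posJ_lt_len _ _ (by omega) (by simp; omega)))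
      · exact (occ_p _ hts _).mpr ⟨j + 1, hPIxj, rfl⟩
      · intro i hi hp
        obtain ⟨i', hi', hpe⟩ := (occ_p _ hts i).mp hp
        have hle : i' ≤ j + 1 := by
          match i', hi'.1 with
          | m + 1, _ =>
            have hm : m < us.length := by have := hi'.2.1; simpa using this
            have hsp : bStartsP (us.getD m []) = true := by
              have := hi'.2.2
              rwa [List.getD_cons_succ] at this
            by_contra hgt
            have := hjmax m (by omega) hm
            rw [this] at hsp
            simp at hsp
        rcases Nat.lt_or_ge i' (j + 1) with hlt | hge
        · have := posJ_lt_posJ ([] :: us) i' (j + 1) hi'.1 hlt (by simp; omega)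
          omega
        · have : i' = j + 1 := by omega
          subst this
          omega
    have hrfu : PySem.Chars.rfind ('_' :: J us) ['_'] = (posJ ([] :: us) us.length : Int) := by
      rw [← hJ]
      apply rfind_eq_of _ _ _ (le_of_lt (posJ_lt_len _ _ (by omega) (by simp)))
      · exact (occ_us _ hts _).mpr ⟨us.length, by omega, by simp, rfl⟩
      · intro i hi hp
        obtain ⟨i', h1, h2, h3⟩ := (occ_us _ hts i).mp hp
        rcases Nat.lt_or_ge i' us.length with hlt | hge
        · have := posJ_lt_posJ ([] :: us) i' us.length h1 hlt (by simp)
          omega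
        · have : i' = us.length := by simp at h2; omega
          subst this
          omega
    rw [aTailTrim]
    by_cases hcase : j + 1 = us.length
    · rw [if_neg (by rw [hrfp, hrfu, hcase]; simp)]
      rw [hcase, List.take_length]
    · have hjlt : j + 1 < us.length := by omega
      have hne2 : posJ ([] :: us) (j + 1) < posJ ([] :: us) us.length :=
        posJ_lt_posJ ([] :: us) (j + 1) us.length (by omega) hjlt (by simp)
      rw [if_pos (by rw [hrfp, hrfu]; intro hcon; omega)]
      rw [hrfu, Int.toNat_natCast]
      have htake : ('_' :: J us).take (posJ ([] :: us) us.length) = '_' :: J (us.take (us.length - 1)) := by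
        rw [← hJ, take_posJ _ _ (by omega) (by simp)]
        have : ([] :: us).take us.length = [] :: us.take (us.length - 1) := by
          have h3 : us.length = (us.length - 1) + 1 := by omega
          rw [h3, List.take_succ_cons, ← h3]
        rw [this, J_cons [] _ (by
          intro hnil
          have := congrArg List.length hnil
          simp at this
          omega)]
        simp
      rw [htake]
      have hstep := ih (us.take (us.length - 1)) f j
        (by simp; omega)
        (fun x hx => hcl x (List.take_subset _ _ hx))
        (by
          intro hnil
          have := congrArg List.length hnil
          simp at this
          omega)
        (by simp; omega)
        (by rw [getD_take us _ j (by omega) (by omega)]; exact hjP)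
        (by
          intro i hi hilen
          rw [getD_take us _ i (by simp at hilen; omega) (by simp at hilen; omega)]
          exact hjmax i hi (by simp at hilen; omega))
        (by
          have hsplit := J_split us (us.length - 1) (by omega) (by omega)
          have : (J us).length = (J (us.take (us.length - 1))).length + 1 + (J (us.drop (us.length - 1))).length := by
            rw [hsplit]
            simp
            omega
          simp only [List.length_cons] at hfuel ⊢
          omega)
      rw [hstep]
      congr 2
      rw [List.take_take]
      congr 1
      omega

-- ---- the token list of a tag ----
theorem tokens_facts (s : List Char) :
    J (PySem.Chars.splitOn s ['_']) = s ∧ PySem.Chars.splitOn s ['_'] ≠ [] ∧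
      Clean (PySem.Chars.splitOn s ['_']) := by
  rw [splitOn_eq_mySplit]
  refine ⟨?_, mySplit_ne_nil _ _ _, mySplit_clean _ _ _ (by simp)⟩
  have := join_mySplit '_' [] s
  simpa [J] using this

-- ---- B's pt list ----
def ptN (ts : List (List Char)) : List Nat :=
  (List.range ts.length).filter (fun i => decide (0 < i) && bStartsP (ts.getD i []))

theorem mem_ptN (ts : List (List Char)) (i : Nat) : i ∈ ptN ts ↔ PIx ts i := by
  simp only [ptN, List.mem_filter, List.mem_range, Bool.and_eq_true, decide_eq_true_eq, PIx]
  tauto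

theorem ptN_pairwise (ts : List (List Char)) : (ptN ts).Pairwise (· < ·) :=
  (List.pairwise_lt_range).filter _

theorem pt_eq_aux (ts : List (List Char)) : ∀ n : Nat,
    (PySem.List.pyRange 1 (n : Int)).filter (fun i => bStartsP (PySem.List.pyGetD ts i [])) =
      ((List.range n).filter (fun i => decide (0 < i) && bStartsP (ts.getD i []))).map
        Int.ofNat := by
  intro n
  induction n with
  | zero =>
    have h0 : PySem.List.pyRange 1 ((0 : Nat) : Int) = [] :=
      List.eq_nil_of_length_eq_zero (by rw [PySem.List.length_pyRange_one]; simp)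
    rw [h0]
    simp
  | succ n ih =>
    match n with
    | 0 =>
      have h0 : PySem.List.pyRange 1 ((1 : Nat) : Int) = [] :=
        List.eq_nil_of_length_eq_zero (by rw [PySem.List.length_pyRange_one]; simp)
      rw [h0]
      simp [List.range_succ]
    | m + 1 =>
      have hcast : ((m + 1 + 1 : Nat) : Int) = ((m + 1 : Nat) : Int) + 1 := by push_cast; ring
      rw [hcast, PySem.List.pyRange_one_succ_right (by omega), List.range_succ,
        List.filter_append, List.filter_append, List.map_append, ih]
      congr 1
      simp only [List.filter_singleton, PySem.List.pyGetD_natCast]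
      by_cases hb : bStartsP (ts.getD (m + 1) []) = true
      · rw [List.getD_eq_getElem?_getD] at hb
        simp [hb]
      · simp only [Bool.not_eq_true] at hb
        rw [List.getD_eq_getElem?_getD] at hb
        simp [hb]

theorem pt_eq (ts : List (List Char)) :
    (PySem.List.pyRange 1 (ts.length : Int)).filter (fun i => bStartsP (PySem.List.pyGetD ts i [])) =
      (ptN ts).map Int.ofNat := pt_eq_aux ts ts.length

theorem headD_min (l : List Nat) (hl : l.Pairwise (· < ·)) : ∀ x ∈ l, l.headD 0 ≤ x := by
  match l with
  | [] => simp
  | a :: rest =>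
    intro x hx
    rcases List.mem_cons.mp hx with rfl | hx
    · simp
    · exact le_of_lt (by simpa using (List.pairwise_cons.mp hl).1 x hx)

theorem le_getLastD (l : List Nat) (hl : l.Pairwise (· < ·)) : ∀ x ∈ l, x ≤ l.getLastD 0 := by
  induction l with
  | nil => simp
  | cons a rest ih =>
    intro x hx
    match rest with
    | [] =>
      simp at hx
      simp [hx]
    | b :: rs =>
      rw [List.getLastD_cons]
      have hrw : (b :: rs).getLastD a = (b :: rs).getLastD 0 := by
        rw [List.getLastD_eq_getLast?, List.getLastD_eq_getLast?]
        rw [List.getLast?_eq_some_getLast (by simp)]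
        simp
      rw [hrw]
      rcases List.mem_cons.mp hx with rfl | hx
      · refine le_trans (le_of_lt ((List.pairwise_cons.mp hl).1 b (by simp))) ?_
        exact ih (List.pairwise_cons.mp hl).2 b (by simp)
      · exact ih (List.pairwise_cons.mp hl).2 x hx

theorem headD_mem (l : List Nat) (h : l ≠ []) : l.headD 0 ∈ l := by
  match l with
  | a :: rest => simp

theorem getLastD_mem (l : List Nat) (h : l ≠ []) : l.getLastD 0 ∈ l := by
  rw [List.getLastD_eq_getLast?, List.getLast?_eq_some_getLast h]
  exact List.getLast_mem h

theorem getD_drop' (l : List (List Char)) (i m : Nat) (h : i + m < l.length) :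
    (l.drop i).getD m [] = l.getD (i + m) [] := by
  rw [List.getD_eq_getElem _ _ (by simp; omega), List.getD_eq_getElem _ _ h]
  simp

-- ---- assembly ----
-- the token-level "skim" core value (what B computes before the SkimPTag branch)
def coreTok (DS : String) : List (List Char) :=
  PySem.Chars.splitOn (DS.toList.drop (PySem.Chars.rfind DS.toList ['.'] + 1).toNat) ['_']
def coreRem (DS : String) (SkimETag SkimSTag : Bool) : List (List Char) :=
  if SkimSTag then
    bDropTokens 'a' (bDropTokens 's' (if SkimETag then bDropTokens 'e' (coreTok DS) else coreTok DS))
  else if SkimETag then bDropTokens 'e' (coreTok DS) else coreTok DS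
def coreList (DS : String) (SkimETag SkimSTag : Bool) : List Char :=
  PySem.Chars.join ['_'] ((coreRem DS SkimETag SkimSTag).headD [] :: bKept (coreRem DS SkimETag SkimSTag).tail)

theorem alt_skim_val (DS : String) (e st : Bool) :
    GetAMITagsMC_alt DS true e st = String.ofList (coreList DS e st) := rfl

theorem skim_val (DS : String) (e st : Bool) (hpre : Pre_GetAMITagsMC DS true e st) :
    GetAMITagsMC DS true e st = String.ofList (coreList DS e st) := by
  obtain ⟨hpe, hps⟩ := hpre
  rw [GetAMITagsMC]
  simp only [eq_self_iff_true, if_true]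
  obtain ⟨hJts, hne, hcl⟩ := tokens_facts (DS.toList.drop (PySem.Chars.rfind DS.toList ['.'] + 1).toNat)
  set ts := PySem.Chars.splitOn (DS.toList.drop (PySem.Chars.rfind DS.toList ['.'] + 1).toNat) ['_'] with hts
  rw [← hJts]
  -- e loop
  set r1 := if e then bDropTokens 'e' ts else ts with hr1
  have h1 : aDropLoop e 'e' ((J ts).length + 1) (J ts) = J r1 := by
    cases e
    · rw [aDropLoop_false]
      simp [hr1]
    · rw [show r1 = bDropTokens 'e' ts from by simp [hr1]]
      exact aDropLoop_eq 'e' (by decide) ts _ hcl hne (hpe rfl) (by omega)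
  have hr1ne : r1 ≠ [] := by
    cases e
    · simpa [hr1] using hne
    · rw [show r1 = bDropTokens 'e' ts from by simp [hr1]]
      exact bDrop_ne_nil _ _ hne
  have hr1cl : Clean r1 := by
    cases e
    · simpa [hr1] using hcl
    · rw [show r1 = bDropTokens 'e' ts from by simp [hr1]]
      exact bDrop_clean _ _ hcl
  have hr1last : r1.getLastD [] = ts.getLastD [] := by
    cases e
    · simp [hr1]
    · rw [show r1 = bDropTokens 'e' ts from by simp [hr1]]
      exact bDrop_getLastD _ _ hne
  rw [h1]
  -- s loop
  set r2 := if st then bDropTokens 's' r1 else r1 with hr2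
  have h2 : aDropLoop st 's' ((J r1).length + 1) (J r1) = J r2 := by
    cases st
    · rw [aDropLoop_false]
      simp [hr2]
    · rw [show r2 = bDropTokens 's' r1 from by simp [hr2]]
      refine aDropLoop_eq 's' (by decide) r1 _ hr1cl hr1ne ?_ (by omega)
      rw [hr1last]
      exact (hps rfl).1
  have hr2ne : r2 ≠ [] := by
    cases st
    · simpa [hr2] using hr1ne
    · rw [show r2 = bDropTokens 's' r1 from by simp [hr2]]
      exact bDrop_ne_nil _ _ hr1ne
  have hr2cl : Clean r2 := by
    cases st
    · simpa [hr2] using hr1cl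
    · rw [show r2 = bDropTokens 's' r1 from by simp [hr2]]
      exact bDrop_clean _ _ hr1cl
  have hr2last : r2.getLastD [] = ts.getLastD [] := by
    cases st
    · rw [show r2 = r1 from by simp [hr2]]
      exact hr1last
    · rw [show r2 = bDropTokens 's' r1 from by simp [hr2], bDrop_getLastD _ _ hr1ne]
      exact hr1last
  rw [h2]
  -- a loop
  set r3 := if st then bDropTokens 'a' r2 else r2 with hr3
  have h3 : aDropLoop st 'a' ((J r2).length + 1) (J r2) = J r3 := by
    cases st
    · rw [aDropLoop_false]
      simp [hr3]
    · rw [show r3 = bDropTokens 'a' r2 from by simp [hr3]]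
      refine aDropLoop_eq 'a' (by decide) r2 _ hr2cl hr2ne ?_ (by omega)
      rw [hr2last]
      exact (hps rfl).2
  have hr3ne : r3 ≠ [] := by
    cases st
    · simpa [hr3] using hr2ne
    · rw [show r3 = bDropTokens 'a' r2 from by simp [hr3]]
      exact bDrop_ne_nil _ _ hr2ne
  have hr3cl : Clean r3 := by
    cases st
    · simpa [hr3] using hr2cl
    · rw [show r3 = bDropTokens 'a' r2 from by simp [hr3]]
      exact bDrop_clean _ _ hr2cl
  rw [h3]
  -- p trim
  rw [aPTrim_eq r3.length r3 ((J r3).length + 1) (le_refl _) hr3cl hr3ne (by omega)]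
  -- identify with coreList
  congr 1
  show J (r3.headD [] :: bKept r3.tail) = coreList DS e st
  have hrem : r3 = coreRem DS e st := by
    cases e <;> cases st <;>
      simp [hr1, hr2, hr3, coreRem, coreTok, ← hts]
  rw [hrem]
  rfl

theorem alt_false_empty (DS : String) (e st : Bool) (h : ptN (coreTok DS) = []) :
    GetAMITagsMC_alt DS false e st = String.ofList (coreList DS e st) := by
  unfold GetAMITagsMC_alt
  simp only [Bool.false_eq_true, if_false]
  rw [show (PySem.List.pyRange 1
        (((PySem.Chars.splitOn (DS.toList.drop (PySem.Chars.rfind DS.toList ['.'] + 1).toNat) ['_']).length : Int))).filter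
        (fun i => bStartsP (PySem.List.pyGetD (PySem.Chars.splitOn (DS.toList.drop (PySem.Chars.rfind DS.toList ['.'] + 1).toNat) ['_']) i [])) =
      (ptN (coreTok DS)).map Int.ofNat from pt_eq _]
  rw [h]
  rfl

theorem alt_false_nonempty (DS : String) (e st : Bool) (h : ptN (coreTok DS) ≠ []) :
    GetAMITagsMC_alt DS false e st = String.ofList (coreList DS e st ++ '_' ::
      PySem.Chars.join ['_'] (PySem.List.slice (coreTok DS)
        (some (Int.ofNat ((ptN (coreTok DS)).headD 0)))
        (some (Int.ofNat ((ptN (coreTok DS)).getLastD 0) + 1)))) := by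
  unfold GetAMITagsMC_alt
  simp only [Bool.false_eq_true, if_false]
  rw [show (PySem.List.pyRange 1
        (((PySem.Chars.splitOn (DS.toList.drop (PySem.Chars.rfind DS.toList ['.'] + 1).toNat) ['_']).length : Int))).filter
        (fun i => bStartsP (PySem.List.pyGetD (PySem.Chars.splitOn (DS.toList.drop (PySem.Chars.rfind DS.toList ['.'] + 1).toNat) ['_']) i [])) =
      (ptN (coreTok DS)).map Int.ofNat from pt_eq _]
  obtain ⟨a, l, hal⟩ := List.exists_cons_of_ne_nil h
  rw [if_neg (by rw [hal]; simp)]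
  have hhead : ((ptN (coreTok DS)).map Int.ofNat).headD 0 = Int.ofNat ((ptN (coreTok DS)).headD 0) := by
    rw [hal]
    simp
  have hlast : ((ptN (coreTok DS)).map Int.ofNat).getLastD 0 = Int.ofNat ((ptN (coreTok DS)).getLastD 0) := by
    rw [List.getLastD_eq_getLast?, List.getLast?_map, List.getLastD_eq_getLast?]
    rw [hal, List.getLast?_eq_some_getLast (by simp)]
    simp
  rw [hhead, hlast]
  rfl

-- ===== VERDICT (by name: the statement is the Claim_ definition above) =====
set_option maxHeartbeats 2000000 in
theorem GetAMITagsMC_spec : Claim_equal_GetAMITagsMC := by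
  unfold Claim_equal_GetAMITagsMC
  intro DS SkimPTag SkimETag SkimSTag _ hpre
  unfold Spec_GetAMITagsMC
  cases SkimPTag
  case false =>
    obtain ⟨hJts, hne, hcl⟩ := tokens_facts (DS.toList.drop (PySem.Chars.rfind DS.toList ['.'] + 1).toNat)
    set ts := PySem.Chars.splitOn (DS.toList.drop (PySem.Chars.rfind DS.toList ['.'] + 1).toNat) ['_'] with hts
    rw [GetAMITagsMC]
    simp only [Bool.false_eq_true, if_false]
    rw [← hJts]
    by_cases hex : ∃ i, PIx ts i
    · have hptne : ptN ts ≠ [] := by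
        obtain ⟨i, hi⟩ := hex
        exact List.ne_nil_of_mem ((mem_ptN ts i).mpr hi)
      set i0 := (ptN ts).headD 0 with hi0d
      set j := (ptN ts).getLastD 0 with hjd
      have hi0 : PIx ts i0 := (mem_ptN ts i0).mp (headD_mem _ hptne)
      have hj : PIx ts j := (mem_ptN ts j).mp (getLastD_mem _ hptne)
      have hi0min : ∀ i, PIx ts i → i0 ≤ i :=
        fun i hi => headD_min _ (ptN_pairwise ts) i ((mem_ptN ts i).mpr hi)
      have hjmax : ∀ i, PIx ts i → i ≤ j :=
        fun i hi => le_getLastD _ (ptN_pairwise ts) i ((mem_ptN ts i).mpr hi)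
      have hi0j : i0 ≤ j := hi0min j hj
      have hrf : PySem.Chars.rfind (J ts) ['_', 'p'] = (posJ ts j : Int) := by
        apply rfind_eq_of _ _ _ (le_of_lt (posJ_lt_len _ j hj.1 hj.2.1))
        · exact (occ_p _ hcl _).mpr ⟨j, hj, rfl⟩
        · intro i hi hp
          obtain ⟨i', hi', hpe'⟩ := (occ_p _ hcl i).mp hp
          have hle : i' ≤ j := hjmax i' hi'
          rcases Nat.lt_or_ge i' j with hlt | hge
          · have := posJ_lt_posJ ts i' j hi'.1 hlt (le_of_lt hj.2.1)
            omega
          · have : i' = j := by omega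
            subst this
            omega
      have hff : PySem.Chars.find (J ts) ['_', 'p'] = (posJ ts i0 : Int) := by
        apply find_eq_of
        · exact (occ_p _ hcl _).mpr ⟨i0, hi0, rfl⟩
        · intro i hi hp
          obtain ⟨i', hi', hpe'⟩ := (occ_p _ hcl i).mp hp
          have := hi0min i' hi'
          rcases Nat.lt_or_ge i0 i' with hlt | hge
          · have := posJ_lt_posJ ts i0 i' hi0.1 hlt (le_of_lt hi'.2.1)
            omega
          · have : i' = i0 := by omega
            subst this
            omega
      rw [if_pos (by rw [hrf]; omega)]
      rw [hff, Int.toNat_natCast]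
      have hu0 : (J ts).drop (posJ ts i0) = '_' :: J (ts.drop i0) := by
        rw [J_split ts i0 hi0.1 hi0.2.1]
        rw [show posJ ts i0 = (J (ts.take i0)).length from rfl]
        exact List.drop_left
      rw [hu0]
      set us := ts.drop i0 with husd
      have husne : us ≠ [] := by
        intro hnil
        have := congrArg List.length hnil
        simp [husd] at this
        have := hi0.2.1
        omega
      have huscl : Clean us := fun x hx => hcl x (List.drop_subset _ _ hx)
      have huslen : us.length = ts.length - i0 := by simp [husd]
      have hj'lt : j - i0 < us.length := by
        have := hj.2.1
        omega
      have hgd : us.getD (j - i0) [] = ts.getD j [] := by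
        rw [husd, getD_drop' _ _ _ (by have := hj.2.1; omega)]
        congr 1
        omega
      have hjP' : bStartsP (us.getD (j - i0) []) = true := by
        rw [hgd]
        exact hj.2.2
      have hmax' : ∀ i, j - i0 < i → i < us.length → bStartsP (us.getD i []) = false := by
        intro i h1 h2
        by_contra hb
        rw [Bool.not_eq_false] at hb
        rw [husd, getD_drop' _ _ _ (by omega)] at hb
        have hPix : PIx ts (i0 + i) := ⟨by omega, by omega, hb⟩
        have := hjmax _ hPix
        omega
      rw [aTailTrim_eq us.length us (('_' :: J us).length + 1) (j - i0) (le_refl _) huscl husne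
        hj'lt hjP' hmax' (by omega)]
      rw [if_pos (show PySem.Chars.startswith ('_' :: J (us.take (j - i0 + 1))) ['_'] = true from by
        simp [PySem.Chars.startswith, List.isPrefixOf])]
      have hdrop1 : ('_' :: J (us.take (j - i0 + 1))).drop 1 = J (us.take (j - i0 + 1)) := by simp
      rw [hdrop1]
      rw [skim_val DS SkimETag SkimSTag hpre]
      rw [alt_false_nonempty DS SkimETag SkimSTag (by rw [show coreTok DS = ts from rfl]; exact hptne)]
      rw [String.toList_ofList]
      have hslice : PySem.List.slice (coreTok DS) (some (Int.ofNat ((ptN (coreTok DS)).headD 0)))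
          (some (Int.ofNat ((ptN (coreTok DS)).getLastD 0) + 1)) = (ts.drop i0).take (j + 1 - i0) := by
        rw [show coreTok DS = ts from rfl]
        rw [show Int.ofNat ((ptN ts).getLastD 0) + 1 = ((j + 1 : Nat) : Int) from by
          rw [← hjd]; push_cast [Int.ofNat_eq_natCast]; ring]
        rw [show Int.ofNat ((ptN ts).headD 0) = ((i0 : Nat) : Int) from by
          rw [← hi0d]; push_cast [Int.ofNat_eq_natCast]; ring]
        exact PySem.List.slice_natCast ts i0 (j + 1)
      rw [hslice]
      rw [show j + 1 - i0 = j - i0 + 1 from by omega]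
      rfl
    · have hptnil : ptN ts = [] := by
        rw [List.eq_nil_iff_forall_not_mem]
        intro i hi
        exact hex ⟨i, (mem_ptN ts i).mp hi⟩
      have hrf : PySem.Chars.rfind (J ts) ['_', 'p'] = -1 := by
        apply rfind_eq_neg_of
        intro i hp
        obtain ⟨i', hi', _⟩ := (occ_p _ hcl i).mp hp
        exact hex ⟨i', hi'⟩
      rw [if_neg (by rw [hrf]; simp)]
      rw [skim_val DS SkimETag SkimSTag hpre]
      rw [alt_false_empty DS SkimETag SkimSTag (by rw [show coreTok DS = ts from rfl]; exact hptnil)]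
  case true =>
    rw [skim_val DS SkimETag SkimSTag hpre, alt_skim_val]
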